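-- pv_equiv track=rewrite | github.com/pr1m8/haive-core | src/haive/core/graph/state_graph/base_graph2.py | _infer_from_naming_patterns
-- ===== SOURCE A (Python) =====
-- from typing import (
--     Any,
--     Callable,
--     Dict,
--     Generic,
--     List,
--     Literal,
--     Optional,
--     Tuple,
--     Type,
--     Union,
-- )
--
-- def _infer_from_naming_patterns(agent_names: List[str]) -> List[str]:
--     """Infer sequence from naming patterns."""
--     patterns = [
--         "planner",
--         "plan",
--         "planning",
--         "analyzer",
--         "analysis",
--         "analyze",
--         "researcher",
--         "research",
--         "search",
--         "executor",
--         "execute",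
--         "execution",
--         "worker",
--         "validator",
--         "validate",
--         "validation",
--         "reviewer",
--         "review",
--         "critique",
--         "replanner",
--         "replan",
--         "replanning",
--         "formatter",
--         "format",
--         "output",
--         "summary",
--         "summarize",
--         "summarizer",
--     ]
--
--     agent_scores = {}
--     for agent_name in agent_names:
--         score = len(patterns)  # Default to end
--         for i, pattern in enumerate(patterns):
--             if pattern in agent_name.lower():
--                 score = i
--                 break
--         agent_scores[agent_name] = score
--
--     sorted_agents = sorted(agent_names, key=lambda x: agent_scores[x])
--
--     # Only return if we found meaningful patterns
--     if len(set(agent_scores.values())) > 1: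
--         return sorted_agents
--
--     return []
-- ===== SOURCE B (Python) =====
-- _PATTERNS = [
--     "planner", "plan", "planning",
--     "analyzer", "analysis", "analyze",
--     "researcher", "research", "search",
--     "executor", "execute", "execution",
--     "worker",
--     "validator", "validate", "validation",
--     "reviewer", "review", "critique",
--     "replanner", "replan", "replanning",
--     "formatter", "format", "output",
--     "summary", "summarize", "summarizer",
-- ]
--
--
-- def _score(low):
--     """First pattern index whose pattern occurs in low, else len(_PATTERNS)."""
--     for i, pattern in enumerate(_PATTERNS):
--         if pattern in low:
--             return i
--     return len(_PATTERNS)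
--
--
-- def _infer_from_naming_patterns(agent_names):
--     """Infer sequence from naming patterns (stable bucket sort over scores)."""
--     buckets = [[] for _ in range(len(_PATTERNS) + 1)]
--     for name in agent_names:
--         buckets[_score(name.lower())].append(name)
--     if sum(1 for b in buckets if b) <= 1:
--         return []
--     return [name for b in buckets for name in b]
-- ===== Notes on version B (the rewrite author's own statement) =====
-- stated objective: alternative
-- what changed: Replaces A's per-name score dict + stable comparison sort + len(set(values)) guard with a stable bucket (counting) sort: names are appended in input order to one bucket per pattern index and the buckets are concatenated, guarded by counting non-empty buckets.
import Mathlib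
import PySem

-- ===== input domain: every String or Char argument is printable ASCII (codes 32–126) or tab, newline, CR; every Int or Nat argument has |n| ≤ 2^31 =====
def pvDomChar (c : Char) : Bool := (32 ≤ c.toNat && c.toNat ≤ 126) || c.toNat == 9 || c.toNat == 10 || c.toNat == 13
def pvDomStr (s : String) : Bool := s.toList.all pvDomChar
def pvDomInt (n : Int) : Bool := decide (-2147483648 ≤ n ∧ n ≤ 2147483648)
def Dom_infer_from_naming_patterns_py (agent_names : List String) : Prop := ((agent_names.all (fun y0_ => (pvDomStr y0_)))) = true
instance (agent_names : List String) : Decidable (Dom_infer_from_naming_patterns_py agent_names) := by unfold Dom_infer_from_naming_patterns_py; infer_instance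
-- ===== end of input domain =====

-- B replaces A's dict-of-scores + comparison sort + set-of-values guard by a stable bucket
-- sort over the bounded score range (one bucket per pattern index, concatenated in order);
-- objective: alternative (no measured speed claim).

-- the shared literal pattern table of the Python module
def pvPatterns : List String := [
  "planner", "plan", "planning",
  "analyzer", "analysis", "analyze",
  "researcher", "research", "search",
  "executor", "execute", "execution",
  "worker",
  "validator", "validate", "validation",
  "reviewer", "review", "critique",
  "replanner", "replan", "replanning",
  "formatter", "format", "output",
  "summary", "summarize", "summarizer"]

-- ===== PORT A =====
-- the inner 'for i, pattern in enumerate(patterns): if pattern in agent_name.lower(): score = i; break'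
def pvScoreLoopA (score : Int) (i : Int) (ps : List String) (low : List Char) : Int :=
  match ps with
  | [] => score
  | p :: rest => if PySem.Chars.isIn p.toList low then i else pvScoreLoopA score (i + 1) rest low

def infer_from_naming_patterns_py (agent_names : List String) : List String :=
  let scores : PySem.Dict String Int :=
    agent_names.foldl
      (fun d name =>
        d.insert name (pvScoreLoopA (pvPatterns.length : Int) 0 pvPatterns (PySem.Chars.lower name.toList)))
      PySem.Dict.empty
  -- key lambda: agent_scores[x]; every x of agent_names is a key of the dict, so getD is exact (KeyError unreachable)
  let sorted_agents := PySem.List.sorted agent_names (fun x => scores.getD x 0) false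
  if 1 < (PySem.Set.ofList scores.values).length then sorted_agents else []

-- ===== PORT B =====
-- Source B's _score: first pattern index occurring in low, else len(_PATTERNS)
def pvScoreB_aux (i : Nat) (ps : List String) (low : List Char) : Nat :=
  match ps with
  | [] => pvPatterns.length
  | p :: rest => if PySem.Chars.isIn p.toList low then i else pvScoreB_aux (i + 1) rest low

def pvScoreB (name : String) : Nat := pvScoreB_aux 0 pvPatterns (PySem.Chars.lower name.toList)

def infer_from_naming_patterns_py_alt (agent_names : List String) : List String :=
  let buckets :=
    agent_names.foldl
      (fun bs name => bs.modify (pvScoreB name) (fun b => b ++ [name]))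
      (List.replicate (pvPatterns.length + 1) ([] : List String))
  if buckets.countP (fun b => !b.isEmpty) ≤ 1 then [] else buckets.flatten

-- ===== PRECONDITION & SPEC =====
def Spec_infer_from_naming_patterns_py (agent_names : List String) (out : List String) : Prop := out = infer_from_naming_patterns_py_alt agent_names
instance (agent_names : List String) (out : List String) : Decidable (Spec_infer_from_naming_patterns_py agent_names out) := by unfold Spec_infer_from_naming_patterns_py; infer_instance

-- ===== CLAIM (what is proved, stated in full; the proofs are below) =====
def Claim_equal_infer_from_naming_patterns_py : Prop := ∀ (agent_names : List String), Dom_infer_from_naming_patterns_py agent_names → Spec_infer_from_naming_patterns_py agent_names (infer_from_naming_patterns_py agent_names)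

-- ===== LEMMAS AND PROOFS =====

-- A's inner loop computes B's score (Int-counted vs Nat-counted first-match search)
theorem pvScore_loop_eq (ps : List String) : ∀ (n : Nat) (low : List Char),
    pvScoreLoopA (pvPatterns.length : Int) (n : Int) ps low = ((pvScoreB_aux n ps low : Nat) : Int) := by
  induction ps with
  | nil => intro n low; simp [pvScoreLoopA, pvScoreB_aux]
  | cons p rest ih =>
    intro n low
    simp only [pvScoreLoopA, pvScoreB_aux]
    by_cases h : PySem.Chars.isIn p.toList low
    · simp [h]
    · simpa [h, Nat.cast_add] using ih (n + 1) low

theorem pvScoreB_aux_bound (ps : List String) : ∀ (n : Nat) (low : List Char),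
    pvScoreB_aux n ps low = pvPatterns.length ∨ pvScoreB_aux n ps low < n + ps.length := by
  induction ps with
  | nil => intro n low; left; rfl
  | cons p rest ih =>
    intro n low
    simp only [pvScoreB_aux, List.length_cons]
    by_cases h : PySem.Chars.isIn p.toList low
    · right; simp only [h, if_true]; omega
    · rcases ih (n + 1) low with h1 | h1
      · left; simpa [h] using h1
      · right; simp only [h, Bool.false_eq_true, if_false]; omega

theorem pvScoreB_lt (name : String) : pvScoreB name < pvPatterns.length + 1 := by
  unfold pvScoreB
  rcases pvScoreB_aux_bound pvPatterns 0 (PySem.Chars.lower name.toList) with h | h <;> omega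

-- the score dict: lookup of a fold of key-determined inserts
theorem pvGetD_foldl_insert (g : String → Int) (names : List String) (y : String) :
    (names.foldl (fun d name => d.insert name (g name)) PySem.Dict.empty).getD y 0
      = if y ∈ names then g y else 0 := by
  induction names using List.reverseRecOn with
  | nil => simp [PySem.Dict.getD_empty]
  | append_singleton xs x ih =>
    rw [List.foldl_append]
    simp only [List.foldl, PySem.Dict.getD_insert, List.mem_append, List.mem_singleton]
    by_cases hxy : y = x
    · simp [hxy]
    · simp [hxy, ih]

-- a Nodup list has more than one element iff it has two different members
theorem pvOne_lt_length_iff {α : Type} (L : List α) (h : L.Nodup) :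
    1 < L.length ↔ ∃ a ∈ L, ∃ b ∈ L, a ≠ b := by
  match L with
  | [] => simp
  | [a] => simp
  | a :: b :: t =>
    constructor
    · intro _
      exact ⟨a, by simp, b, by simp, by simp [List.nodup_cons] at h; exact h.1.1⟩
    · intro _; simp [List.length_cons]

-- insertBy passes over a suffix whose elements all come strictly after x
theorem pvInsertBy_append_of_before {α : Type} (bef : α → α → Bool) (x : α) (L1 L2 : List α)
    (h : ∀ a ∈ L2, bef x a = true) :
    PySem.List.insertBy bef x (L1 ++ L2) = PySem.List.insertBy bef x L1 ++ L2 := by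
  induction L1 with
  | nil =>
    cases L2 with
    | nil => rfl
    | cons a t => simp [PySem.List.insertBy, h a (by simp)]
  | cons a L1' ih =>
    simp only [List.cons_append, PySem.List.insertBy]
    by_cases hb : bef x a <;> simp [hb, ih]

-- insertBy with a pointwise-equal comparison
theorem pvInsertBy_congr {α : Type} (bef1 bef2 : α → α → Bool) (x : α) (ys : List α)
    (h : ∀ a ∈ ys, bef1 x a = bef2 x a) :
    PySem.List.insertBy bef1 x ys = PySem.List.insertBy bef2 x ys := by
  induction ys with
  | nil => rfl
  | cons a t ih =>
    simp only [PySem.List.insertBy]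
    rw [h a (by simp)]
    by_cases hb : bef2 x a <;> simp [hb]
    · exact ih (fun a ha => h a (by simp [ha]))

-- sorted only looks at the key of list members
theorem pvSorted_key_congr {α κ : Type} [LinearOrder κ] (k1 k2 : α → κ) (xs : List α)
    (h : ∀ x ∈ xs, k1 x = k2 x) :
    PySem.List.sorted xs k1 false = PySem.List.sorted xs k2 false := by
  rw [PySem.List.sorted_eq_foldl_insertBy, PySem.List.sorted_eq_foldl_insertBy]
  have main : ∀ (l : List α) (acc : List α), (∀ x ∈ l, k1 x = k2 x) → (∀ a ∈ acc, k1 a = k2 a) →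
      l.foldl (fun acc x => PySem.List.insertBy (fun a b => decide (k1 a < k1 b)) x acc) acc
        = l.foldl (fun acc x => PySem.List.insertBy (fun a b => decide (k2 a < k2 b)) x acc) acc := by
    intro l
    induction l with
    | nil => intro acc _ _; rfl
    | cons x t ih =>
      intro acc hl hacc
      simp only [List.foldl]
      rw [pvInsertBy_congr (fun a b => decide (k1 a < k1 b)) (fun a b => decide (k2 a < k2 b)) x acc
        (fun a ha => by
          show decide (k1 x < k1 a) = decide (k2 x < k2 a)
          rw [hl x (by simp), hacc a ha])]
      exact ih _ (fun y hy => hl y (by simp [hy]))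
        (fun a ha => by
          rcases (PySem.List.mem_insertBy _ _ _ _).1 ha with h1 | h1
          · rw [h1]; exact hl x (by simp)
          · exact hacc a h1)
  exact main xs [] h (by simp)

-- inserting x into concatenated buckets appends it to bucket (key x)
theorem pvInsert_into_buckets {α : Type} (key : α → Nat) (x : α) :
    ∀ (N : Nat), key x < N → ∀ (xs : List α),
    PySem.List.insertBy (fun a b => decide ((key a : Int) < (key b : Int))) x
        ((List.range N).flatMap (fun k => xs.filter (fun y => key y == k)))
      = (List.range N).flatMap
          (fun k => xs.filter (fun y => key y == k) ++ if key x == k then [x] else []) := by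
  intro N
  induction N with
  | zero => intro h; omega
  | succ N ih =>
    intro hx xs
    rw [List.range_succ, List.flatMap_append, List.flatMap_append]
    simp only [List.flatMap_cons, List.flatMap_nil, List.append_nil]
    by_cases hN : key x = N
    · have hnot : ∀ a ∈ (List.range N).flatMap (fun k => xs.filter (fun y => key y == k))
          ++ xs.filter (fun y => key y == N),
          (fun a b => decide ((key a : Int) < (key b : Int))) x a = false := by
        intro a ha
        rcases List.mem_append.1 ha with h1 | h1
        · rcases List.mem_flatMap.1 h1 with ⟨k, hk, hmem⟩
          have : key a = k := by simpa using (List.mem_filter.1 hmem).2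
          have : k < N := List.mem_range.1 hk
          simp; omega
        · have : key a = N := by simpa using (List.mem_filter.1 h1).2
          simp; omega
      rw [PySem.List.insertBy_of_forall_not_before _ _ _ hnot]
      have hother : ∀ k ∈ List.range N,
          (xs.filter (fun y => key y == k) ++ if key x == k then [x] else [])
            = xs.filter (fun y => key y == k) := by
        intro k hk
        have : k < N := List.mem_range.1 hk
        have : ¬ (key x == k) = true := by simp; omega
        simp [this]
      rw [List.flatMap_congr hother]
      simp [hN, List.append_assoc]
    · have hbef : ∀ a ∈ xs.filter (fun y => key y == N),
          (fun a b => decide ((key a : Int) < (key b : Int))) x a = true := by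
        intro a ha
        have : key a = N := by simpa using (List.mem_filter.1 ha).2
        simp; omega
      rw [pvInsertBy_append_of_before _ _ _ _ hbef, ih (by omega) xs]
      have : ¬ (key x == N) = true := by simp; omega
      simp [this]

-- stable sort by a bounded Nat key is the concatenation of its buckets
theorem pvSorted_buckets {α : Type} (key : α → Nat) (N : Nat) (xs : List α)
    (h : ∀ x ∈ xs, key x < N) :
    PySem.List.sorted xs (fun x => (key x : Int)) false
      = (List.range N).flatMap (fun k => xs.filter (fun y => key y == k)) := by
  induction xs using List.reverseRecOn with
  | nil => rw [PySem.List.sorted_eq_foldl_insertBy]; simp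
  | append_singleton ys x ih =>
    have hsort : PySem.List.sorted (ys ++ [x]) (fun x => (key x : Int)) false
        = PySem.List.insertBy (fun a b => decide ((key a : Int) < (key b : Int))) x
            (PySem.List.sorted ys (fun x => (key x : Int)) false) := by
      rw [PySem.List.sorted_eq_foldl_insertBy, PySem.List.sorted_eq_foldl_insertBy,
        List.foldl_append]
      rfl
    rw [hsort, ih (fun y hy => h y (by simp [hy])),
      pvInsert_into_buckets key x N (h x (by simp)) ys]
    refine List.flatMap_congr (fun k _ => ?_)
    rw [List.filter_append]
    by_cases hxk : key x = k
    · have : (key x == k) = true := by simp [hxk]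
      simp [List.filter, hxk]
    · have : (key x == k) = false := by simp [hxk]
      simp [List.filter, this]

-- the bucket fold builds exactly the per-score filters of the input
theorem pvBuckets_invariant (names : List String) :
    names.foldl (fun bs name => bs.modify (pvScoreB name) (fun b => b ++ [name]))
        (List.replicate (pvPatterns.length + 1) ([] : List String))
      = (List.range (pvPatterns.length + 1)).map
          (fun k => names.filter (fun y => pvScoreB y == k)) := by
  induction names using List.reverseRecOn with
  | nil =>
    apply List.ext_getElem <;> simp
  | append_singleton ys x ih =>
    rw [List.foldl_append]
    simp only [List.foldl]
    rw [ih]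
    apply List.ext_getElem
    · simp [List.length_modify]
    · intro j h1 h2
      rw [List.getElem_modify]
      have hj : j < pvPatterns.length + 1 := by
        simpa [List.length_modify] using h1
      simp only [List.getElem_map, List.getElem_range, List.filter_append]
      by_cases hs : pvScoreB x = j
      · simp [hs]
      · have : ¬ (pvScoreB x == j) = true := by simpa using hs
        simp [hs, this]

-- ===== VERDICT (by name: the statement is the Claim_ definition above) =====
theorem infer_from_naming_patterns_py_spec : Claim_equal_infer_from_naming_patterns_py := by
  intro names _
  unfold Spec_infer_from_naming_patterns_py
  simp only [infer_from_naming_patterns_py, infer_from_naming_patterns_py_alt]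
  have hscore : ∀ name : String,
      pvScoreLoopA (pvPatterns.length : Int) 0 pvPatterns (PySem.Chars.lower name.toList)
        = ((pvScoreB name : Nat) : Int) := by
    intro name
    have := pvScore_loop_eq pvPatterns 0 (PySem.Chars.lower name.toList)
    simpa [pvScoreB] using this
  set g : String → Int :=
    fun name => pvScoreLoopA (pvPatterns.length : Int) 0 pvPatterns (PySem.Chars.lower name.toList)
    with hg
  set d : PySem.Dict String Int :=
    names.foldl (fun d name => d.insert name (g name)) PySem.Dict.empty with hd
  have hkeys : d.keys = PySem.Set.ofList names := by
    rw [hd, PySem.Dict.keys_foldl_insert names (fun d x => g x) PySem.Dict.empty,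
      PySem.Dict.keys_empty, PySem.Set.update_nil_left]
  have hnodup : d.keys.Nodup := by
    rw [hd]
    exact PySem.Dict.nodup_keys_foldl_insert names (fun d x => g x) PySem.Dict.empty
      PySem.Dict.nodup_keys_empty
  have hgetD : ∀ y ∈ names, d.getD y 0 = ((pvScoreB y : Nat) : Int) := by
    intro y hy
    rw [hd, pvGetD_foldl_insert g names y, if_pos hy, hg]
    exact hscore y
  have hvalues : d.values = (PySem.Set.ofList names).map (fun k => ((pvScoreB k : Nat) : Int)) := by
    rw [PySem.Dict.values_eq_map_keys d hnodup 0, hkeys]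
    exact List.map_congr_left (fun k hk => hgetD k ((PySem.Set.mem_ofList names k).1 hk))
  have hA : 1 < (PySem.Set.ofList d.values).length ↔
      ∃ x ∈ names, ∃ y ∈ names, pvScoreB x ≠ pvScoreB y := by
    rw [pvOne_lt_length_iff _ (PySem.Set.nodup_ofList _)]
    constructor
    · rintro ⟨a, ha, b, hb, hab⟩
      rw [PySem.Set.mem_ofList, hvalues, List.mem_map] at ha hb
      obtain ⟨x, hx, hax⟩ := ha
      obtain ⟨y, hy, hby⟩ := hb
      rw [PySem.Set.mem_ofList] at hx hy
      refine ⟨x, hx, y, hy, fun e => hab ?_⟩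
      rw [← hax, ← hby, e]
    · rintro ⟨x, hx, y, hy, hne⟩
      refine ⟨((pvScoreB x : Nat) : Int), ?_, ((pvScoreB y : Nat) : Int), ?_, by exact_mod_cast hne⟩
      · rw [PySem.Set.mem_ofList, hvalues, List.mem_map]
        exact ⟨x, (PySem.Set.mem_ofList names x).2 hx, rfl⟩
      · rw [PySem.Set.mem_ofList, hvalues, List.mem_map]
        exact ⟨y, (PySem.Set.mem_ofList names y).2 hy, rfl⟩
  set buckets : List (List String) :=
    names.foldl (fun bs name => bs.modify (pvScoreB name) (fun b => b ++ [name]))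
      (List.replicate (pvPatterns.length + 1) ([] : List String)) with hbk
  have hbuck : buckets = (List.range (pvPatterns.length + 1)).map
      (fun k => names.filter (fun y => pvScoreB y == k)) := pvBuckets_invariant names
  have hB : 1 < buckets.countP (fun b => !b.isEmpty) ↔
      ∃ x ∈ names, ∃ y ∈ names, pvScoreB x ≠ pvScoreB y := by
    rw [hbuck, List.countP_map, List.countP_eq_length_filter]
    rw [pvOne_lt_length_iff _ (List.Nodup.filter _ (List.nodup_range))]
    have hmem : ∀ k : Nat,
        k ∈ (List.range (pvPatterns.length + 1)).filter
            ((fun b => !b.isEmpty) ∘ fun k => names.filter (fun y => pvScoreB y == k))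
          ↔ ∃ x ∈ names, pvScoreB x = k := by
      intro k
      rw [List.mem_filter]
      constructor
      · rintro ⟨_, hk⟩
        simp only [Function.comp, Bool.not_eq_eq_eq_not, Bool.not_true] at hk
        rcases List.exists_mem_of_ne_nil _ (List.isEmpty_eq_false_iff.1 hk) with
          ⟨x, hxmem⟩
        rcases List.mem_filter.1 hxmem with ⟨hx, he⟩
        exact ⟨x, hx, by simpa using he⟩
      · rintro ⟨x, hx, hxk⟩
        constructor
        · rw [List.mem_range]; have := pvScoreB_lt x; omega
        · simp only [Function.comp, Bool.not_eq_eq_eq_not, Bool.not_true]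
          have hxmem : x ∈ names.filter (fun y => pvScoreB y == k) :=
            List.mem_filter.2 ⟨hx, by simpa using hxk⟩
          exact List.isEmpty_eq_false_iff.2 (List.ne_nil_of_mem hxmem)
    constructor
    · rintro ⟨k1, hk1, k2, hk2, hkk⟩
      obtain ⟨x, hx, hxk⟩ := (hmem k1).1 hk1
      obtain ⟨y, hy, hyk⟩ := (hmem k2).1 hk2
      exact ⟨x, hx, y, hy, fun e => hkk (by rw [← hxk, ← hyk, e])⟩
    · rintro ⟨x, hx, y, hy, hne⟩
      exact ⟨pvScoreB x, (hmem _).2 ⟨x, hx, rfl⟩, pvScoreB y, (hmem _).2 ⟨y, hy, rfl⟩, hne⟩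
  by_cases hP : ∃ x ∈ names, ∃ y ∈ names, pvScoreB x ≠ pvScoreB y
  · have hc : ¬ buckets.countP (fun b => !b.isEmpty) ≤ 1 := by
      have := hB.mpr hP; omega
    rw [if_pos (hA.mpr hP), if_neg hc]
    rw [pvSorted_key_congr (fun x => d.getD x 0) (fun x => ((pvScoreB x : Nat) : Int)) names hgetD,
      pvSorted_buckets pvScoreB (pvPatterns.length + 1) names (fun x _ => pvScoreB_lt x),
      hbuck, List.flatMap_def]
  · rw [if_neg (fun hlt => hP (hA.mp hlt)), if_pos (by by_contra hc; exact hP (hB.mp (by omega)))]
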